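-- pv_equiv track=rewrite | github.com/pypi-data/pypi-mirror-306 | packages/pi-haiku/pi_haiku-0.2.4.tar.gz/pi_haiku-0.2.4/src/pi_haiku/utils/utils.py | custom_sort_dict
-- ===== SOURCE A (Python) =====
-- from typing import Any, Optional, Sequence
--
-- def custom_sort_dict(input_dict: dict[str, Any], order_list: list[str]) -> dict[str, Any]:
--     def sort_key(key: str) -> tuple[int, int | str]:
--         if key in order_list:
--             return (0, order_list.index(key))
--         else:
--             return (1, key)
--
--     sorted_keys = sorted(input_dict.keys(), key=sort_key)
--     sorted_dict = {key: input_dict[key] for key in sorted_keys}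
--     return sorted_dict
-- ===== SOURCE B (Python) =====
-- def custom_sort_dict(input_dict: dict, order_list: list) -> dict:
--     # Phase 1: keys listed in order_list, in first-occurrence order of order_list.
--     ordered = [k for k in dict.fromkeys(order_list) if k in input_dict]
--     # Phase 2: the remaining keys, sorted lexicographically.
--     rest = sorted(k for k in input_dict if k not in order_list)
--     return {k: input_dict[k] for k in ordered + rest}
-- ===== Notes on version B (the rewrite author's own statement) =====
-- stated objective: alternative
-- what changed: A sorts all keys with one compound sort key (membership test + list.index inside the comparator); B builds the result in two phases - deduplicated order_list filtered to the dict's keys, then a plain lexicographic sort of the leftover keys - and concatenates them.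
import Mathlib
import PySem

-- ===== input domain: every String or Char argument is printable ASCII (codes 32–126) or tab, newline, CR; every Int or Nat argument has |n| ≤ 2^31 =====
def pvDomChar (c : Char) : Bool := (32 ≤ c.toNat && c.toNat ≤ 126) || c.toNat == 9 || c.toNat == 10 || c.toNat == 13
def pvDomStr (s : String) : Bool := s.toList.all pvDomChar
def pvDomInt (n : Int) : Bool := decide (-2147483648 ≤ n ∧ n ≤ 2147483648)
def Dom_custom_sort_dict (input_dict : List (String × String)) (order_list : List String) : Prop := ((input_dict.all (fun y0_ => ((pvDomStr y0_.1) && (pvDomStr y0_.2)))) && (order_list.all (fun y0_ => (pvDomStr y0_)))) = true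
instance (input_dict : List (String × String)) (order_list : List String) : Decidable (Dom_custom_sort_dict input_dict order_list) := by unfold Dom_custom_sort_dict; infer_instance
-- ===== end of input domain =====

-- B replaces A's single compound-key sort by two phases: order_list deduplicated and
-- filtered to the dict's keys, then the leftover keys sorted lexicographically.

-- ===== PORT A =====
-- sort_key(key): (0, order_list.index(key)) if key in order_list else (1, key).
-- The Python tuple (0,int)/(1,str) is encoded as Lex (Int ⊕ String): inl < inr always,
-- exactly Python's tier-0-before-tier-1 comparison (second components only compared within a tier).
def pvSortKey (order_list : List String) (key : String) : Lex (Int ⊕ String) :=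
  if order_list.contains key then
    toLex (Sum.inl (((PySem.List.index? order_list key).getD 0 : Nat) : Int))
  else
    toLex (Sum.inr key)

def custom_sort_dict (input_dict : List (String × String)) (order_list : List String) : List (String × String) :=
  -- sorted_keys = sorted(input_dict.keys(), key=sort_key); {key: input_dict[key] for key in sorted_keys}
  ((PySem.List.sorted (PySem.Dict.mk input_dict).keys (pvSortKey order_list) false).foldl
    (fun acc k => acc.insert k ((PySem.Dict.mk input_dict).getD k "")) PySem.Dict.empty).items

-- ===== PORT B =====
def custom_sort_dict_alt (input_dict : List (String × String)) (order_list : List String) : List (String × String) :=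
  -- ordered = [k for k in dict.fromkeys(order_list) if k in input_dict]
  -- rest = sorted(k for k in input_dict if k not in order_list)
  -- {k: input_dict[k] for k in ordered + rest}
  (((PySem.List.dedup order_list).filter (fun k => (PySem.Dict.mk input_dict).contains k) ++
      PySem.List.sorted ((PySem.Dict.mk input_dict).keys.filter (fun k => !order_list.contains k)) (fun k => k) false).foldl
    (fun acc k => acc.insert k ((PySem.Dict.mk input_dict).getD k "")) PySem.Dict.empty).items

-- ===== PRECONDITION & SPEC =====
-- Pre_ only requires the association list to have distinct keys, i.e. to actually represent
-- a Python dict (a Python dict cannot hold duplicate keys, so no input A accepts is excluded).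
def Pre_custom_sort_dict (input_dict : List (String × String)) (order_list : List String) : Prop :=
  (input_dict.map Prod.fst).Nodup
instance (input_dict : List (String × String)) (order_list : List String) : Decidable (Pre_custom_sort_dict input_dict order_list) := by unfold Pre_custom_sort_dict; infer_instance

def pvWitness_custom_sort_dict : (List (String × String)) × List String :=
  ([("b", "1"), ("a", "2"), ("c", "3")], ["c", "x", "c"])

def Spec_custom_sort_dict (input_dict : List (String × String)) (order_list : List String) (out : List (String × String)) : Prop := out = custom_sort_dict_alt input_dict order_list
instance (input_dict : List (String × String)) (order_list : List String) (out : List (String × String)) : Decidable (Spec_custom_sort_dict input_dict order_list out) := by unfold Spec_custom_sort_dict; infer_instance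

-- ===== CLAIM (what is proved, stated in full; the proofs are below) =====
def Claim_equal_custom_sort_dict : Prop := ∀ (input_dict : List (String × String)) (order_list : List String), Dom_custom_sort_dict input_dict order_list → Pre_custom_sort_dict input_dict order_list → Spec_custom_sort_dict input_dict order_list (custom_sort_dict input_dict order_list)

-- ===== LEMMAS AND PROOFS =====

-- a ∈ l gives idxOf? a l = some _
theorem pvIdxOf?_isSome (a : String) (l : List String) (h : a ∈ l) : (List.idxOf? a l).isSome := by
  induction l with
  | nil => simp at h
  | cons x t ih =>
    by_cases hx : x = a
    · simp [List.idxOf?_cons, hx]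
    · rcases List.mem_cons.mp h with h' | h'
      · exact absurd h'.symm hx
      · simp only [List.idxOf?_cons]
        split
        · simp
        · simpa using ih h'

-- first-occurrence positions increase along PySem.List.dedup l
theorem pvDedup_pairwise (l : List String) :
    (PySem.List.dedup l).Pairwise
      (fun a b => (List.idxOf? a l).getD 0 < (List.idxOf? b l).getD 0) := by
  induction l with
  | nil => simp [PySem.List.dedup]
  | cons x t ih =>
    rw [PySem.List.dedup_eq_ofList, PySem.Set.ofList_cons, PySem.Set.discard.eq_def]
    refine List.Pairwise.cons ?_ ?_
    · intro b hb
      have hb' := List.mem_filter.mp hb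
      have hbt : b ∈ t := by
        have := hb'.1
        rwa [← PySem.List.dedup_eq_ofList, PySem.List.mem_dedup] at this
      have hbx : b ≠ x := by simpa using hb'.2
      obtain ⟨j, hj⟩ := Option.isSome_iff_exists.mp (pvIdxOf?_isSome b t hbt)
      simp [List.idxOf?_cons, hbx.symm, hj]
    · have ihf := (ih.filter (fun y => !y == x))
      rw [← PySem.List.dedup_eq_ofList]
      refine List.Pairwise.imp_of_mem ?_ ihf
      intro a b ha hb hab
      have hax : a ≠ x := by simpa using (List.mem_filter.mp ha).2
      have hbx : b ≠ x := by simpa using (List.mem_filter.mp hb).2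
      have hat : a ∈ t := (PySem.List.mem_dedup t a).mp (List.mem_filter.mp ha).1
      have hbt : b ∈ t := (PySem.List.mem_dedup t b).mp (List.mem_filter.mp hb).1
      obtain ⟨i, hi⟩ := Option.isSome_iff_exists.mp (pvIdxOf?_isSome a t hat)
      obtain ⟨j, hj⟩ := Option.isSome_iff_exists.mp (pvIdxOf?_isSome b t hbt)
      simp only [hi, hj, Option.getD_some] at hab
      simp [List.idxOf?_cons, hax.symm, hbx.symm, hi, hj]
      omega

theorem pvSortKey_of_mem (order_list : List String) (a : String) (h : a ∈ order_list) :
    pvSortKey order_list a = toLex (Sum.inl (((List.idxOf? a order_list).getD 0 : Nat) : Int)) := by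
  simp [pvSortKey, PySem.List.index?_eq_idxOf?, h]

theorem pvSortKey_of_not_mem (order_list : List String) (a : String) (h : a ∉ order_list) :
    pvSortKey order_list a = toLex (Sum.inr a) := by
  simp [pvSortKey, h]

-- the heart: A's sorted key list IS B's two-phase key list
theorem pvKeys_eq (input_dict : List (String × String)) (order_list : List String)
    (hnd : (input_dict.map Prod.fst).Nodup) :
    PySem.List.sorted (PySem.Dict.mk input_dict).keys (pvSortKey order_list) false =
      (PySem.List.dedup order_list).filter (fun k => (PySem.Dict.mk input_dict).contains k) ++
      PySem.List.sorted ((PySem.Dict.mk input_dict).keys.filter (fun k => !order_list.contains k)) (fun k => k) false := by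
  have hknd : (PySem.Dict.mk input_dict).keys.Nodup := hnd
  apply PySem.List.sorted_eq_of_perm_of_pairwise_lt
  · -- (ordered ++ rest).Perm keys
    have hordperm : ((PySem.List.dedup order_list).filter (fun k => (PySem.Dict.mk input_dict).contains k)).Perm
        ((PySem.Dict.mk input_dict).keys.filter (fun k => order_list.contains k)) := by
      apply (List.perm_ext_iff_of_nodup ((PySem.List.nodup_dedup order_list).filter _) (hknd.filter _)).mpr
      intro a
      simp only [List.mem_filter, PySem.List.mem_dedup]
      constructor
      · rintro ⟨ha, hc⟩
        exact ⟨((PySem.Dict.contains_iff_mem_keys _ _).mp hc), List.contains_iff_mem.mpr ha⟩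
      · rintro ⟨hk, hc⟩
        exact ⟨List.contains_iff_mem.mp hc, (PySem.Dict.contains_iff_mem_keys _ _).mpr hk⟩
    have hrestperm := PySem.List.sorted_perm
      ((PySem.Dict.mk input_dict).keys.filter (fun k => !order_list.contains k)) (fun k : String => k) false
    exact (hordperm.append hrestperm).trans
      (List.filter_append_perm (fun k => order_list.contains k) (PySem.Dict.mk input_dict).keys)
  · -- strictly increasing under pvSortKey
    rw [List.pairwise_append]
    refine ⟨?_, ?_, ?_⟩
    · -- within ordered: increasing first index in order_list
      refine List.Pairwise.imp_of_mem ?_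
        ((pvDedup_pairwise order_list).filter (fun k => (PySem.Dict.mk input_dict).contains k))
      intro a b ha hb hab
      have hao : a ∈ order_list := (PySem.List.mem_dedup _ _).mp (List.mem_filter.mp ha).1
      have hbo : b ∈ order_list := (PySem.List.mem_dedup _ _).mp (List.mem_filter.mp hb).1
      rw [pvSortKey_of_mem _ _ hao, pvSortKey_of_mem _ _ hbo, Sum.Lex.inl_lt_inl_iff]
      exact_mod_cast hab
    · -- within rest: strictly increasing strings (keys are distinct)
      have hle := PySem.List.sorted_pairwise
        ((PySem.Dict.mk input_dict).keys.filter (fun k => !order_list.contains k)) (fun k : String => k)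
      have hnodup : (PySem.List.sorted
          ((PySem.Dict.mk input_dict).keys.filter (fun k => !order_list.contains k)) (fun k : String => k) false).Nodup :=
        (PySem.List.sorted_perm _ _ _).symm.nodup (hknd.filter _)
      have hne := (List.Pairwise.and hle hnodup)
      refine List.Pairwise.imp_of_mem ?_ hne
      intro a b ha hb hab
      have hao : a ∉ order_list := by
        have := (List.mem_filter.mp ((PySem.List.mem_sorted _ _ _ _).mp ha)).2
        simpa using this
      have hbo : b ∉ order_list := by
        have := (List.mem_filter.mp ((PySem.List.mem_sorted _ _ _ _).mp hb)).2
        simpa using this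
      rw [pvSortKey_of_not_mem _ _ hao, pvSortKey_of_not_mem _ _ hbo, Sum.Lex.inr_lt_inr_iff]
      exact lt_of_le_of_ne hab.1 hab.2
    · -- ordered keys (tier 0) come before the rest (tier 1)
      intro a ha b hb
      have hao : a ∈ order_list := (PySem.List.mem_dedup _ _).mp (List.mem_filter.mp ha).1
      have hbo : b ∉ order_list := by
        have := (List.mem_filter.mp ((PySem.List.mem_sorted _ _ _ _).mp hb)).2
        simpa using this
      rw [pvSortKey_of_mem _ _ hao, pvSortKey_of_not_mem _ _ hbo]
      exact Sum.Lex.inl_lt_inr _ _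

-- ===== VERDICT (by name: the statement is the Claim_ definition above) =====
theorem custom_sort_dict_spec : Claim_equal_custom_sort_dict := by
  intro input_dict order_list _hdom hpre
  unfold Spec_custom_sort_dict custom_sort_dict custom_sort_dict_alt
  rw [pvKeys_eq input_dict order_list hpre]
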